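-- pv_equiv track=rewrite | github.com/IverSyversen/Hackerspace | task1_lat_spn.py | build_lat
-- ===== SOURCE A (Python) =====
-- def dot(a: int, b: int) -> int:
--     """Bitwise dot product (parity of a AND b) mod 2."""
--     return bin(a & b).count("1") % 2
--
-- def build_lat(sbox: list, n_in: int, n_out: int) -> list:
--     """
--     Build the Linear Approximation Table for sbox.
--     lat[a][b] = #{x : a·x = b·S(x)} − 2^(n_in−1)
--     """
--     size_in = 1 << n_in
--     size_out = 1 << n_out
--     half = size_in >> 1
--
--     lat = [[0] * size_out for _ in range(size_in)]
--     for a in range(size_in):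
--         for b in range(size_out):
--             count = sum(1 for x in range(size_in) if dot(a, x) == dot(b, sbox[x]))
--             lat[a][b] = count - half
--     return lat
-- ===== SOURCE B (Python) =====
-- def _parity(v: int) -> int:
--     return bin(v).count("1") % 2
--
-- def _wht(f: list) -> list:
--     """Recursive fast Walsh-Hadamard transform."""
--     n = len(f)
--     if n <= 1:
--         return f
--     h = n // 2
--     L = _wht(f[:h])
--     R = _wht(f[h:])
--     return [l + r for l, r in zip(L, R)] + [l - r for l, r in zip(L, R)]
--
-- def build_lat(sbox: list, n_in: int, n_out: int) -> list:
--     size_in = 1 << n_in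
--     size_out = 1 << n_out
--     half = size_in >> 1
--     cols = []
--     for b in range(size_out):
--         f = [1 - 2 * _parity(b & sbox[x]) for x in range(size_in)]
--         t = _wht(f)
--         cols.append([(v + size_in) // 2 - half for v in t])
--     return [[cols[b][a] for b in range(size_out)] for a in range(size_in)]
-- ===== Notes on version B (the rewrite author's own statement) =====
-- stated objective: faster
-- what changed: Instead of counting agreements x with a separate O(2^n_in) scan for every (a,b) pair, B computes, for each output mask b, the sign vector (-1)^(b.S(x)) and obtains the whole LAT column at once with a recursive fast Walsh-Hadamard transform, then transposes.
import Mathlib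
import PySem

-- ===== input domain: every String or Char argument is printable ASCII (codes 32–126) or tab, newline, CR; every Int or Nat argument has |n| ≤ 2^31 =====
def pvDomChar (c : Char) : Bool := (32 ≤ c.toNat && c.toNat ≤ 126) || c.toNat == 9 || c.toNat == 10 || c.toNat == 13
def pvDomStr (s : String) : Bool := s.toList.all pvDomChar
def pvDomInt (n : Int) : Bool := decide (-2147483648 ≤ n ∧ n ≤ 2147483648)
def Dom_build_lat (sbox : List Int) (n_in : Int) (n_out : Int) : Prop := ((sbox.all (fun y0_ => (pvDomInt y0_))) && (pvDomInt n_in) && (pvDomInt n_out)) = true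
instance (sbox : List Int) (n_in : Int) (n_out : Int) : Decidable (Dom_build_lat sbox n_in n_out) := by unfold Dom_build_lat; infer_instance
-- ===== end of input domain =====

-- B replaces A's O(2^(2·n_in)·2^n_out) per-entry counting loop by, for each output
-- mask b, a fast Walsh–Hadamard transform of the sign vector (-1)^(b·S(x)), which
-- yields a whole column of the LAT at once (objective: faster, asymptotic).

-- ===== PORT A =====
-- dot(a, b): bin(a & b).count("1") % 2  (PySem.Int.bitCount reads |n|, exactly like bin().count("1"))
def pydot (a b : Int) : Int := ((PySem.Int.bitCount (PySem.Int.band a b) : Int)) % 2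

def build_lat (sbox : List Int) (n_in : Int) (n_out : Int) : List (List Int) :=
  let size_in : Int := 1 <<< n_in.toNat   -- 1 << n_in; exact for 0 ≤ n_in (Pre_ excludes negatives, where Python raises ValueError)
  let size_out : Int := 1 <<< n_out.toNat
  let half : Int := size_in >>> 1
  (PySem.List.pyRange 0 size_in).map (fun a =>
    (PySem.List.pyRange 0 size_out).map (fun b =>
      ((PySem.List.pyRange 0 size_in).foldl
        (fun count x =>
          if pydot a x = pydot b (PySem.List.pyGetD sbox x 0) then count + 1 else count) 0)
        - half))

-- ===== PORT B =====
-- _parity(v): bin(v).count("1") % 2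
def pyparity (v : Int) : Int := ((PySem.Int.bitCount v : Int)) % 2

-- _wht(f): recursive fast Walsh–Hadamard transform
def wht (f : List Int) : List Int :=
  if f.length ≤ 1 then f
  else
    let h := f.length / 2
    let L := wht (f.take h)
    let R := wht (f.drop h)
    (List.zipWith (· + ·) L R) ++ (List.zipWith (· - ·) L R)
termination_by f.length
decreasing_by
  · simp only [List.length_take]; omega
  · simp only [List.length_drop]; omega

def build_lat_alt (sbox : List Int) (n_in : Int) (n_out : Int) : List (List Int) :=
  let size_in : Int := 1 <<< n_in.toNat
  let size_out : Int := 1 <<< n_out.toNat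
  let half : Int := size_in >>> 1
  let cols := (PySem.List.pyRange 0 size_out).map (fun b =>
    (wht ((PySem.List.pyRange 0 size_in).map (fun x =>
        1 - 2 * pyparity (PySem.Int.band b (PySem.List.pyGetD sbox x 0))))).map
      (fun v => PySem.Int.floordiv (v + size_in) 2 - half))
  (PySem.List.pyRange 0 size_in).map (fun a =>
    (PySem.List.pyRange 0 size_out).map (fun b =>
      PySem.List.pyGetD (PySem.List.pyGetD cols b []) a 0))

-- ===== PRECONDITION & SPEC =====
-- Pre_ excludes exactly the inputs where Python A raises: a negative shift count
-- (ValueError on 1 << n) or an sbox shorter than 2^n_in (IndexError on sbox[x]).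
def Pre_build_lat (sbox : List Int) (n_in : Int) (n_out : Int) : Prop :=
  0 ≤ n_in ∧ 0 ≤ n_out ∧ (2 : Int) ^ n_in.toNat ≤ sbox.length
instance (sbox : List Int) (n_in : Int) (n_out : Int) : Decidable (Pre_build_lat sbox n_in n_out) := by
  unfold Pre_build_lat; infer_instance

def pvWitness_build_lat : List Int × Int × Int := ([3, 1, 0, 2], 2, 2)

def Spec_build_lat (sbox : List Int) (n_in : Int) (n_out : Int) (out : List (List Int)) : Prop := out = build_lat_alt sbox n_in n_out
instance (sbox : List Int) (n_in : Int) (n_out : Int) (out : List (List Int)) : Decidable (Spec_build_lat sbox n_in n_out out) := by unfold Spec_build_lat; infer_instance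

-- ===== CLAIM (what is proved, stated in full; the proofs are below) =====
def Claim_equal_build_lat : Prop := ∀ (sbox : List Int) (n_in : Int) (n_out : Int), Dom_build_lat sbox n_in n_out → Pre_build_lat sbox n_in n_out → Spec_build_lat sbox n_in n_out (build_lat sbox n_in n_out)

-- ===== LEMMAS AND PROOFS =====

-- popcount of a natural number, as computed by PySem.Int.bitCount
def pc (m : Nat) : Nat := PySem.Int.bitCount (m : Int)

-- (-1)^(a·x) as an integer
def chiN (a x : Nat) : Int := 1 - 2 * ((pc (a &&& x) : Int) % 2)

-- the naive Walsh sum: Σ_{x<2^n} (-1)^(a·x) f[x]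
def Ssum (n a : Nat) (f : List Int) : Int :=
  ((List.range (2 ^ n)).map (fun x => chiN a x * f.getD x 0)).sum

theorem pc_rec (m : Nat) : pc m = m % 2 + pc (m / 2) := by
  rcases Nat.eq_zero_or_pos m with h | h
  · subst h; simp [pc, PySem.Int.bitCount_zero]
  · exact PySem.Int.bitCount_natCast h

theorem pc_add_pow : ∀ (n c u : Nat), c ≤ 1 → u < 2 ^ n → pc (c * 2 ^ n + u) = c + pc u := by
  intro n
  induction n with
  | zero =>
    intro c u hc hu
    interval_cases u
    interval_cases c <;> simp [pc]
    · decide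
  | succ n ih =>
    intro c u hc hu
    have hpow : 2 ^ (n + 1) = 2 * 2 ^ n := by ring
    have h1 : (c * 2 ^ (n + 1) + u) % 2 = u % 2 := by
      interval_cases c <;> omega
    have h2 : (c * 2 ^ (n + 1) + u) / 2 = c * 2 ^ n + u / 2 := by
      interval_cases c <;> omega
    have h3 : u / 2 < 2 ^ n := by omega
    rw [pc_rec (c * 2 ^ (n + 1) + u), h1, h2, ih c (u / 2) hc h3, pc_rec u]
    omega

theorem tb_eps (n a ε j : Nat) (hε : ε ≤ 1) (ha : a < 2 ^ n) :
    (ε * 2 ^ n + a).testBit j =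
      (if j < n then a.testBit j else if j = n then ε == 1 else false) := by
  interval_cases ε
  · simp only [Nat.zero_mul, Nat.zero_add]
    split_ifs with h1 h2
    · rfl
    · subst h2; simp [Nat.testBit_lt_two_pow ha]
    · have : a < 2 ^ j := lt_of_lt_of_le ha (Nat.pow_le_pow_right (by omega) (by omega))
      simp [Nat.testBit_lt_two_pow this]
  · simp only [Nat.one_mul]
    split_ifs with h1 h2
    · exact Nat.testBit_two_pow_add_gt h1 a
    · subst h2
      rw [Nat.testBit_two_pow_add_eq, Nat.testBit_lt_two_pow ha]
      rfl
    · have hlt : 2 ^ n + a < 2 ^ j := by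
        have h2j : 2 ^ (n + 1) ≤ 2 ^ j := Nat.pow_le_pow_right (by omega) (by omega)
        have : 2 ^ (n + 1) = 2 ^ n + 2 ^ n := by ring
        omega
      simp [Nat.testBit_lt_two_pow hlt]

theorem land_split (n a x ε δ : Nat) (ha : a < 2 ^ n) (hx : x < 2 ^ n)
    (hε : ε ≤ 1) (hδ : δ ≤ 1) :
    (ε * 2 ^ n + a) &&& (δ * 2 ^ n + x) = ε * δ * 2 ^ n + (a &&& x) := by
  have hax : a &&& x < 2 ^ n := lt_of_le_of_lt (Nat.and_le_left) ha
  apply Nat.eq_of_testBit_eq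
  intro j
  rw [Nat.testBit_land, tb_eps n a ε j hε ha, tb_eps n x δ j hδ hx,
      tb_eps n (a &&& x) (ε * δ) j (by nlinarith) hax]
  split_ifs with h1 h2
  · rw [Nat.testBit_land]
  · interval_cases ε <;> interval_cases δ <;> rfl
  · rfl

theorem chi_split (n a x ε δ : Nat) (ha : a < 2 ^ n) (hx : x < 2 ^ n)
    (hε : ε ≤ 1) (hδ : δ ≤ 1) :
    chiN (ε * 2 ^ n + a) (δ * 2 ^ n + x) = (if ε * δ = 1 then -1 else 1) * chiN a x := by
  unfold chiN
  rw [land_split n a x ε δ ha hx hε hδ,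
      pc_add_pow n (ε * δ) (a &&& x) (by nlinarith) (lt_of_le_of_lt (Nat.and_le_left) ha)]
  rcases Nat.le_one_iff_eq_zero_or_eq_one.mp (show ε * δ ≤ 1 by nlinarith) with h | h <;>
    rw [h] <;> simp <;> push_cast <;> omega

theorem chi_lo_hi (n a x : Nat) (ha : a < 2 ^ n) (hx : x < 2 ^ n) :
    chiN a (2 ^ n + x) = chiN a x := by
  have := chi_split n a x 0 1 ha hx (by omega) (by omega)
  simpa using this

theorem chi_hi_lo (n a x : Nat) (ha : a < 2 ^ n) (hx : x < 2 ^ n) :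
    chiN (2 ^ n + a) x = chiN a x := by
  have := chi_split n a x 1 0 ha hx (by omega) (by omega)
  simpa using this

theorem chi_hi_hi (n a x : Nat) (ha : a < 2 ^ n) (hx : x < 2 ^ n) :
    chiN (2 ^ n + a) (2 ^ n + x) = -chiN a x := by
  have := chi_split n a x 1 1 ha hx (by omega) (by omega)
  simpa using this

theorem zipWith_map_same {α β : Type} (f : β → β → β) (g h : α → β) :
    ∀ (l : List α), List.zipWith f (l.map g) (l.map h) = l.map (fun x => f (g x) (h x)) := by
  intro l; induction l with
  | nil => rfl
  | cons y l ih => simp [ih]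

theorem sum_map_neg {α : Type} (g : α → Int) :
    ∀ (l : List α), (l.map (fun x => -g x)).sum = -(l.map g).sum := by
  intro l; induction l with
  | nil => simp
  | cons y l ih => simp [ih]; ring

theorem getD_take (f : List Int) (m x : Nat) (hx : x < m) :
    (f.take m).getD x 0 = f.getD x 0 := by
  simp [List.getD_eq_getElem?_getD, List.getElem?_take, hx]

theorem getD_drop (f : List Int) (m x : Nat) :
    (f.drop m).getD x 0 = f.getD (m + x) 0 := by
  simp [List.getD_eq_getElem?_getD, List.getElem?_drop]

theorem Ssum_split (n a : Nat) (f : List Int) :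
    Ssum (n + 1) a f =
      ((List.range (2 ^ n)).map (fun x => chiN a x * (f.take (2 ^ n)).getD x 0)).sum +
      ((List.range (2 ^ n)).map (fun x => chiN a (2 ^ n + x) * (f.drop (2 ^ n)).getD x 0)).sum := by
  unfold Ssum
  have h : 2 ^ (n + 1) = 2 ^ n + 2 ^ n := by ring
  rw [h, List.range_add, List.map_append, List.sum_append, List.map_map]
  congr 1
  · exact congrArg _ (List.map_congr_left (fun x hx => by
      rw [getD_take f (2 ^ n) x (List.mem_range.mp hx)]))
  · exact congrArg _ (List.map_congr_left (fun x _ => by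
      simp only [Function.comp_apply]
      rw [getD_drop f (2 ^ n) x]))

theorem wht_unfold (f : List Int) (h : ¬ f.length ≤ 1) :
    wht f = List.zipWith (· + ·) (wht (f.take (f.length / 2))) (wht (f.drop (f.length / 2))) ++
            List.zipWith (· - ·) (wht (f.take (f.length / 2))) (wht (f.drop (f.length / 2))) := by
  conv_lhs => rw [wht]
  simp only [if_neg h]

theorem wht_spec : ∀ (n : Nat) (f : List Int), f.length = 2 ^ n →
    wht f = (List.range (2 ^ n)).map (fun a => Ssum n a f) := by
  intro n
  induction n with
  | zero =>
    intro f hf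
    match f, hf with
    | [c], _ =>
      rw [wht]
      norm_num [Ssum, chiN, pc, PySem.Int.bitCount_zero, List.range_succ]
  | succ n ih =>
    intro f hf
    have h2 : 2 ^ (n + 1) = 2 ^ n + 2 ^ n := by ring
    have hpos : 0 < 2 ^ n := Nat.two_pow_pos n
    have hnot : ¬ f.length ≤ 1 := by omega
    have hh : f.length / 2 = 2 ^ n := by omega
    rw [wht_unfold f hnot, hh]
    have hL : (f.take (2 ^ n)).length = 2 ^ n := by
      simp [List.length_take]; omega
    have hR : (f.drop (2 ^ n)).length = 2 ^ n := by
      simp [List.length_drop]; omega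
    rw [ih _ hL, ih _ hR]
    rw [zipWith_map_same, zipWith_map_same]
    rw [h2, List.range_add, List.map_append, List.map_map]
    congr 1
    · apply List.map_congr_left
      intro a hma
      have ha : a < 2 ^ n := List.mem_range.mp hma
      rw [Ssum_split n a f]
      have e2 : ((List.range (2 ^ n)).map
          (fun x => chiN a (2 ^ n + x) * (f.drop (2 ^ n)).getD x 0)).sum
          = Ssum n a (f.drop (2 ^ n)) := by
        unfold Ssum
        exact congrArg _ (List.map_congr_left (fun x hx => by
          rw [chi_lo_hi n a x ha (List.mem_range.mp hx)]))
      rw [e2]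
      rfl
    · apply List.map_congr_left
      intro a hma
      have ha : a < 2 ^ n := List.mem_range.mp hma
      simp only [Function.comp_apply]
      rw [Ssum_split n (2 ^ n + a) f]
      have e1 : ((List.range (2 ^ n)).map
          (fun x => chiN (2 ^ n + a) x * (f.take (2 ^ n)).getD x 0)).sum
          = Ssum n a (f.take (2 ^ n)) := by
        unfold Ssum
        exact congrArg _ (List.map_congr_left (fun x hx =>
          by rw [chi_hi_lo n a x ha (List.mem_range.mp hx)]))
      have e2 : ((List.range (2 ^ n)).map
          (fun x => chiN (2 ^ n + a) (2 ^ n + x) * (f.drop (2 ^ n)).getD x 0)).sum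
          = -Ssum n a (f.drop (2 ^ n)) := by
        unfold Ssum
        rw [← sum_map_neg]
        exact congrArg _ (List.map_congr_left (fun x hx => by
          rw [chi_hi_hi n a x ha (List.mem_range.mp hx)]; ring))
      rw [e1, e2]
      ring

theorem foldl_count {α : Type} (c : α → Prop) [DecidablePred c] :
    ∀ (l : List α) (i : Int),
      l.foldl (fun acc x => if c x then acc + 1 else acc) i =
        i + (l.map (fun x => if c x then (1 : Int) else 0)).sum := by
  intro l
  induction l with
  | nil => simp
  | cons y l ih =>
    intro i
    simp only [List.foldl_cons, List.map_cons, List.sum_cons]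
    by_cases h : c y <;> simp [h, ih] <;> ring

theorem sum_pm {α : Type} (c : α → Prop) [DecidablePred c] :
    ∀ (l : List α),
      (l.map (fun x => if c x then (1 : Int) else -1)).sum =
        2 * (l.map (fun x => if c x then (1 : Int) else 0)).sum - l.length := by
  intro l
  induction l with
  | nil => simp
  | cons y l ih =>
    simp only [List.map_cons, List.sum_cons, List.length_cons]
    by_cases h : c y <;> simp [h, ih] <;> push_cast <;> ring

theorem pydot_natCast (a x : Nat) : pydot (a : Int) (x : Int) = ((pc (a &&& x) : Int)) % 2 := by
  simp [pydot, pc, PySem.Int.band_natCast]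

theorem pydot_cases (u v : Int) : pydot u v = 0 ∨ pydot u v = 1 := by
  unfold pydot; omega

theorem pm_mul (p q : Int) (hp : p = 0 ∨ p = 1) (hq : q = 0 ∨ q = 1) :
    (1 - 2 * p) * (1 - 2 * q) = if p = q then 1 else -1 := by
  rcases hp with h | h <;> rcases hq with h' | h' <;> subst h <;> subst h' <;> norm_num

theorem chiN_eq_pydot (a x : Nat) : chiN a x = 1 - 2 * pydot (a : Int) (x : Int) := by
  rw [pydot_natCast]; rfl

theorem size_in_eq (N : Nat) : 1 <<< N = 2 ^ N := by
  rw [Nat.shiftLeft_eq]; ring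

-- the a-th Walsh coefficient of column b equals (2·count − 2^N)
theorem column_entry (sbox : List Int) (N : Nat) (b : Int) (a : Nat) (ha : a < 2 ^ N)
    (fvec : List Int)
    (hfv : fvec = (List.range (2 ^ N)).map
      (fun x : Nat => 1 - 2 * pyparity (PySem.Int.band b (PySem.List.pyGetD sbox (x : Int) 0)))) :
    Ssum N a fvec =
      2 * ((List.range (2 ^ N)).map (fun x : Nat =>
        if pydot (a : Int) (x : Int) = pydot b (PySem.List.pyGetD sbox (x : Int) 0)
        then (1 : Int) else 0)).sum - (2 ^ N : Nat) := by
  have hterm : ∀ x ∈ List.range (2 ^ N),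
      chiN a x * fvec.getD x 0 =
        (if pydot (a : Int) (x : Int) = pydot b (PySem.List.pyGetD sbox (x : Int) 0)
         then (1 : Int) else -1) := by
    intro x hx
    have hxlt : x < 2 ^ N := List.mem_range.mp hx
    have hget : fvec.getD x 0 =
        1 - 2 * pyparity (PySem.Int.band b (PySem.List.pyGetD sbox (x : Int) 0)) := by
      rw [hfv]
      exact PySem.List.getD_map_range
        (fun x : Nat => 1 - 2 * pyparity (PySem.Int.band b (PySem.List.pyGetD sbox (x : Int) 0)))
        (2 ^ N) x 0 hxlt
    have hparity : pyparity (PySem.Int.band b (PySem.List.pyGetD sbox (x : Int) 0)) =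
        pydot b (PySem.List.pyGetD sbox (x : Int) 0) := rfl
    rw [hget, hparity, chiN_eq_pydot]
    exact pm_mul _ _ (pydot_cases (a : Int) (x : Int))
      (pydot_cases b (PySem.List.pyGetD sbox (x : Int) 0))
  have hsum : Ssum N a fvec = ((List.range (2 ^ N)).map (fun x : Nat =>
      if pydot (a : Int) (x : Int) = pydot b (PySem.List.pyGetD sbox (x : Int) 0)
      then (1 : Int) else -1)).sum := by
    unfold Ssum
    exact congrArg _ (List.map_congr_left hterm)
  rw [hsum,
    sum_pm (fun x : Nat => pydot (a : Int) (x : Int) = pydot b (PySem.List.pyGetD sbox (x : Int) 0))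
      (List.range (2 ^ N))]
  simp

theorem floordiv_cancel (S c : Int) : PySem.Int.floordiv (2 * S - c + c) 2 = S := by
  rw [PySem.Int.floordiv_eq_ediv_of_pos (by omega)]
  omega

theorem build_lat_eq (sbox : List Int) (n_in : Int) (n_out : Int) :
    build_lat sbox n_in n_out = build_lat_alt sbox n_in n_out := by
  simp only [build_lat, build_lat_alt, size_in_eq, PySem.List.pyRange_zero_nat, List.map_map]
  apply List.map_congr_left
  intro a hma
  have ha : a < 2 ^ n_in.toNat := List.mem_range.mp hma
  simp only [Function.comp_apply]
  apply List.map_congr_left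
  intro b hmb
  have hb : b < 2 ^ n_out.toNat := List.mem_range.mp hmb
  simp only [Function.comp_apply]
  -- B side: select column b, transform it, select entry a
  rw [PySem.List.pyGetD_of_nonneg _ _ (Int.natCast_nonneg b), Int.toNat_natCast,
      PySem.List.getD_map_range _ _ _ _ hb]
  simp only [Function.comp_apply]
  rw [wht_spec n_in.toNat _ (by simp), List.map_map]
  rw [PySem.List.pyGetD_of_nonneg _ _ (Int.natCast_nonneg a), Int.toNat_natCast,
      PySem.List.getD_map_range _ _ _ _ ha]
  simp only [Function.comp_apply]
  rw [column_entry sbox n_in.toNat (b : Int) a ha _ (by rfl)]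
  -- A side: the counting loop
  rw [List.foldl_map,
    foldl_count (fun x : Nat =>
        pydot (a : Int) (x : Int) = pydot (b : Int) (PySem.List.pyGetD sbox (x : Int) 0))
      (List.range (2 ^ n_in.toNat)) 0]
  rw [floordiv_cancel]
  simp

-- ===== VERDICT (by name: the statement is the Claim_ definition above) =====
theorem build_lat_spec : Claim_equal_build_lat := by
  intro sbox n_in n_out _ _
  unfold Spec_build_lat
  exact build_lat_eq sbox n_in n_out
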